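-- pv_equiv track=rewrite | github.com/Classicalqy/Introduction-to-Computation | 计算概论大作业/strategy.py | diy
-- ===== SOURCE A (Python) =====
-- def diy(price, w, arg2=None, arg3=None, arg4=None):
--     ans=[0]
--     for i in range(1,len(price)):
--         judge1=1#这两个参量用来判断一个区间是否一直增大或者一直减小
--         judge2=1
--         if i<w:
--             ans.append(0)
--         else:
--             for j in range(0,w):
--                 if price[i-j]<price[i-j-1]:
--                     judge1=0
--                 if price[i-j]>price[i-j-1]:
--                     judge2=0
--             if judge1==1:
--                 ans.append(-1)
--             elif judge2==1:
--                 ans.append(1)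
--             else:
--                 ans.append(0)
--     return ans
-- ===== SOURCE B (Python) =====
-- def diy(price, w, arg2=None, arg3=None, arg4=None):
--     # O(n): running streak lengths instead of re-scanning a w-wide window per index
--     ans = [0]
--     up = down = 0
--     for i in range(1, len(price)):
--         up = up + 1 if price[i] >= price[i-1] else 0
--         down = down + 1 if price[i] <= price[i-1] else 0
--         if i < w:
--             ans.append(0)
--         elif up >= w:
--             ans.append(-1)
--         elif down >= w:
--             ans.append(1)
--         else:
--             ans.append(0)
--     return ans
-- ===== Notes on version B (the rewrite author's own statement) =====
-- stated objective: faster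
-- what changed: Replaced the O(w) inner re-scan of each w-wide window by running consecutive increasing/decreasing streak counters updated in O(1) per index (window is monotone iff the streak length reaches w).
import Mathlib
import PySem

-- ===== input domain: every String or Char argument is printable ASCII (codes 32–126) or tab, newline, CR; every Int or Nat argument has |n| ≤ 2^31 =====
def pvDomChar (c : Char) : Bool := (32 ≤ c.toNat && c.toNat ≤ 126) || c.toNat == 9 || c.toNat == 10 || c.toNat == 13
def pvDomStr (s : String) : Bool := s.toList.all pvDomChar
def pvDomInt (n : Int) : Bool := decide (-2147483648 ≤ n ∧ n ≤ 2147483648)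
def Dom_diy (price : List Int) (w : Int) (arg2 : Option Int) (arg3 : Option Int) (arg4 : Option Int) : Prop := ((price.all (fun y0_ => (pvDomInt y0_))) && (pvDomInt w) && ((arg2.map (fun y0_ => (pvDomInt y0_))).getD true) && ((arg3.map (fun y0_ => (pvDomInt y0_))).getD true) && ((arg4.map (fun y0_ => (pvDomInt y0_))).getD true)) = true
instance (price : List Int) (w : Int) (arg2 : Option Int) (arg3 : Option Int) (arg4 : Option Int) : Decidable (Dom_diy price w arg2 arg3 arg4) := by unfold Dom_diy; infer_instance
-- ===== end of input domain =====

-- B replaces A's O(w) re-scan of each window by O(1) running monotone-streak counters (faster in a timing run).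


-- ===== PORT A =====
-- All price[i-j]/price[i-j-1] accesses happen only when w ≤ i < len, so they are in range in Python;
-- pyGetD with default 0 is therefore exact.
def diy (price : List Int) (w : Int) (arg2 : Option Int) (arg3 : Option Int) (arg4 : Option Int) : List Int :=
  (PySem.List.pyRange 1 (price.length : Int) 1).foldl
    (fun ans i =>
      if i < w then ans ++ [0]
      else
        let jd : Int × Int :=
          (PySem.List.pyRange 0 w 1).foldl
            (fun jd j =>
              (if PySem.List.pyGetD price (i - j) 0 < PySem.List.pyGetD price (i - j - 1) 0 then 0 else jd.1,
               if PySem.List.pyGetD price (i - j) 0 > PySem.List.pyGetD price (i - j - 1) 0 then 0 else jd.2))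
            (1, 1)
        if jd.1 = 1 then ans ++ [-1]
        else if jd.2 = 1 then ans ++ [1]
        else ans ++ [0])
    [0]

-- ===== PORT B =====
def diy_alt (price : List Int) (w : Int) (arg2 : Option Int) (arg3 : Option Int) (arg4 : Option Int) : List Int :=
  ((PySem.List.pyRange 1 (price.length : Int) 1).foldl
    (fun (st : List Int × Int × Int) i =>
      let up : Int := if PySem.List.pyGetD price i 0 ≥ PySem.List.pyGetD price (i - 1) 0 then st.2.1 + 1 else 0
      let down : Int := if PySem.List.pyGetD price i 0 ≤ PySem.List.pyGetD price (i - 1) 0 then st.2.2 + 1 else 0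
      (if i < w then st.1 ++ [0]
       else if w ≤ up then st.1 ++ [-1]
       else if w ≤ down then st.1 ++ [1]
       else st.1 ++ [0], up, down))
    ([0], 0, 0)).1

-- ===== PRECONDITION & SPEC =====
def Spec_diy (price : List Int) (w : Int) (arg2 : Option Int) (arg3 : Option Int) (arg4 : Option Int) (out : List Int) : Prop := out = diy_alt price w arg2 arg3 arg4
instance (price : List Int) (w : Int) (arg2 : Option Int) (arg3 : Option Int) (arg4 : Option Int) (out : List Int) : Decidable (Spec_diy price w arg2 arg3 arg4 out) := by unfold Spec_diy; infer_instance

-- ===== CLAIM (what is proved, stated in full; the proofs are below) =====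
def Claim_equal_diy : Prop := ∀ (price : List Int) (w : Int) (arg2 : Option Int) (arg3 : Option Int) (arg4 : Option Int), Dom_diy price w arg2 arg3 arg4 → Spec_diy price w arg2 arg3 arg4 (diy price w arg2 arg3 arg4)

-- ===== LEMMAS AND PROOFS =====

-- length of the streak of consecutive indices i ≤ m (counting down) satisfying P
def pvStreak (P : Int → Prop) [DecidablePred P] : Nat → Int
  | 0 => 0
  | m+1 => if P ((m : Int) + 1) then pvStreak P m + 1 else 0

theorem pvStreak_nonneg (P : Int → Prop) [DecidablePred P] (m : Nat) : 0 ≤ pvStreak P m := by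
  induction m with
  | zero => simp [pvStreak]
  | succ m ih => simp only [pvStreak]; split_ifs <;> omega

theorem pvStreak_ge_iff (P : Int → Prop) [DecidablePred P] (m : Nat) (w : Int) (hw : w ≤ (m : Int)) :
    w ≤ pvStreak P m ↔ ∀ j : Int, 0 ≤ j → j < w → P ((m : Int) - j) := by
  induction m generalizing w with
  | zero =>
    constructor
    · intro _ j hj0 hjw; omega
    · intro _; simpa [pvStreak] using hw
  | succ m ih =>
    by_cases hw0 : w ≤ 0
    · constructor
      · intro _ j hj0 hjw; omega
      · intro _; have := pvStreak_nonneg P (m + 1); omega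
    · by_cases hs : P ((m : Int) + 1)
      · simp only [pvStreak, if_pos hs]
        have h1 : w - 1 ≤ (m : Int) := by push_cast at hw ⊢; omega
        constructor
        · intro h j hj0 hjw
          rcases eq_or_lt_of_le hj0 with hj | hj
          · have e : ((m + 1 : Nat) : Int) - j = (m : Int) + 1 := by omega
            rw [e]; exact hs
          · have h2 : (w - 1) ≤ pvStreak P m := by omega
            have := (ih (w - 1) h1).mp h2 (j - 1) (by omega) (by omega)
            have e : (m : Int) - (j - 1) = ((m + 1 : Nat) : Int) - j := by push_cast; ring
            rwa [e] at this
        · intro h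
          have h2 : ∀ j : Int, 0 ≤ j → j < w - 1 → P ((m : Int) - j) := by
            intro j hj0 hjw
            have := h (j + 1) (by omega) (by omega)
            have e : ((m + 1 : Nat) : Int) - (j + 1) = (m : Int) - j := by push_cast; ring
            rwa [e] at this
          have := (ih (w - 1) h1).mpr h2
          omega
      · simp only [pvStreak, if_neg hs]
        constructor
        · intro h; omega
        · intro h
          exfalso
          have := h 0 le_rfl (by omega)
          have e : ((m + 1 : Nat) : Int) - 0 = (m : Int) + 1 := by push_cast; ring
          rw [e] at this
          exact hs this

-- A's inner judge loop computes a pair of "all elements fail the condition" flags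
theorem pvFoldJudge (l : List Int) (c1 c2 : Int → Prop) [DecidablePred c1] [DecidablePred c2] (a b : Int) :
    l.foldl (fun jd j => (if c1 j then 0 else jd.1, if c2 j then 0 else jd.2)) (a, b)
      = (if ∀ j ∈ l, ¬ c1 j then a else (0 : Int), if ∀ j ∈ l, ¬ c2 j then b else (0 : Int)) := by
  induction l generalizing a b with
  | nil => simp
  | cons x l ih =>
    simp only [List.foldl_cons, ih]
    split_ifs <;> simp_all

theorem pv_main (price : List Int) (w : Int) (m : Nat) :
    ((PySem.List.pyRange 1 ((m : Int) + 1) 1).foldl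
      (fun (st : List Int × Int × Int) i =>
        let up : Int := if PySem.List.pyGetD price i 0 ≥ PySem.List.pyGetD price (i - 1) 0 then st.2.1 + 1 else 0
        let down : Int := if PySem.List.pyGetD price i 0 ≤ PySem.List.pyGetD price (i - 1) 0 then st.2.2 + 1 else 0
        (if i < w then st.1 ++ [0]
         else if w ≤ up then st.1 ++ [-1]
         else if w ≤ down then st.1 ++ [1]
         else st.1 ++ [0], up, down))
      ([0], 0, 0))
    = ((PySem.List.pyRange 1 ((m : Int) + 1) 1).foldl
        (fun ans i =>
          if i < w then ans ++ [0]
          else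
            let jd : Int × Int :=
              (PySem.List.pyRange 0 w 1).foldl
                (fun jd j =>
                  (if PySem.List.pyGetD price (i - j) 0 < PySem.List.pyGetD price (i - j - 1) 0 then 0 else jd.1,
                   if PySem.List.pyGetD price (i - j) 0 > PySem.List.pyGetD price (i - j - 1) 0 then 0 else jd.2))
                (1, 1)
            if jd.1 = 1 then ans ++ [-1]
            else if jd.2 = 1 then ans ++ [1]
            else ans ++ [0])
        [0],
       pvStreak (fun i => PySem.List.pyGetD price (i - 1) 0 ≤ PySem.List.pyGetD price i 0) m,
       pvStreak (fun i => PySem.List.pyGetD price i 0 ≤ PySem.List.pyGetD price (i - 1) 0) m) := by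
  induction m with
  | zero =>
    rw [PySem.List.pyRange_one_eq_nil (by omega)]
    simp [pvStreak]
  | succ m ih =>
    rw [show ((m + 1 : Nat) : Int) + 1 = ((m : Int) + 1) + 1 by push_cast; ring,
        PySem.List.pyRange_one_succ_right (by omega)]
    simp only [List.foldl_append, List.foldl_cons, List.foldl_nil, ih]
    have hup : (if PySem.List.pyGetD price ((m : Int) + 1) 0 ≥ PySem.List.pyGetD price ((m : Int) + 1 - 1) 0
          then pvStreak (fun i => PySem.List.pyGetD price (i - 1) 0 ≤ PySem.List.pyGetD price i 0) m + 1 else 0)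
        = pvStreak (fun i => PySem.List.pyGetD price (i - 1) 0 ≤ PySem.List.pyGetD price i 0) (m + 1) := by
      simp [pvStreak, ge_iff_le]
    have hdown : (if PySem.List.pyGetD price ((m : Int) + 1) 0 ≤ PySem.List.pyGetD price ((m : Int) + 1 - 1) 0
          then pvStreak (fun i => PySem.List.pyGetD price i 0 ≤ PySem.List.pyGetD price (i - 1) 0) m + 1 else 0)
        = pvStreak (fun i => PySem.List.pyGetD price i 0 ≤ PySem.List.pyGetD price (i - 1) 0) (m + 1) := by
      simp [pvStreak]
    rw [hup, hdown]
    refine Prod.ext ?_ rfl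
    by_cases hiw : (m : Int) + 1 < w
    · simp only [if_pos hiw]
    · simp only [if_neg hiw]
      rw [pvFoldJudge]
      have hkey1 : (w ≤ pvStreak (fun i => PySem.List.pyGetD price (i - 1) 0 ≤ PySem.List.pyGetD price i 0) (m + 1)) ↔
          (∀ j ∈ PySem.List.pyRange 0 w 1,
            ¬ PySem.List.pyGetD price ((m : Int) + 1 - j) 0 < PySem.List.pyGetD price ((m : Int) + 1 - j - 1) 0) := by
        rw [pvStreak_ge_iff _ (m + 1) w (by push_cast; omega)]
        constructor
        · intro h j hj
          rw [PySem.List.mem_pyRange_one] at hj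
          have := h j hj.1 hj.2
          rw [show ((m + 1 : Nat) : Int) - j = (m : Int) + 1 - j by push_cast; ring] at this
          omega
        · intro h j hj0 hjw
          have := h j (by rw [PySem.List.mem_pyRange_one]; omega)
          rw [show ((m + 1 : Nat) : Int) - j = (m : Int) + 1 - j by push_cast; ring]
          omega
      have hkey2 : (w ≤ pvStreak (fun i => PySem.List.pyGetD price i 0 ≤ PySem.List.pyGetD price (i - 1) 0) (m + 1)) ↔
          (∀ j ∈ PySem.List.pyRange 0 w 1,
            ¬ PySem.List.pyGetD price ((m : Int) + 1 - j) 0 > PySem.List.pyGetD price ((m : Int) + 1 - j - 1) 0) := by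
        rw [pvStreak_ge_iff _ (m + 1) w (by push_cast; omega)]
        constructor
        · intro h j hj
          rw [PySem.List.mem_pyRange_one] at hj
          have := h j hj.1 hj.2
          rw [show ((m + 1 : Nat) : Int) - j = (m : Int) + 1 - j by push_cast; ring] at this
          omega
        · intro h j hj0 hjw
          have := h j (by rw [PySem.List.mem_pyRange_one]; omega)
          rw [show ((m + 1 : Nat) : Int) - j = (m : Int) + 1 - j by push_cast; ring]
          omega
      simp only [hkey1, hkey2]
      split_ifs <;> first | rfl | omega

-- ===== VERDICT (by name: the statement is the Claim_ definition above) =====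
theorem diy_spec : Claim_equal_diy := by
  intro price w arg2 arg3 arg4 _
  unfold Spec_diy diy diy_alt
  rcases Nat.eq_zero_or_pos price.length with h | h
  · rw [h, PySem.List.pyRange_one_eq_nil (a := 1) (b := ((0 : Nat) : Int)) (by norm_num)]; rfl
  · obtain ⟨m, hm⟩ : ∃ m, price.length = m + 1 := ⟨price.length - 1, by omega⟩
    rw [hm, show ((m + 1 : Nat) : Int) = (m : Int) + 1 by push_cast; ring, pv_main]
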